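-- pv_equiv track=rewrite | github.com/T-Python-Sep-24/LAB_FUNCTIONS_101 | function101.py | LAB_FUNCTIONS_101_string
-- ===== SOURCE A (Python) =====
-- def LAB_FUNCTIONS_101_string(n: int) -> str:
--
--     result = ''
--     for i in range(n, 0, -1):
--         line = ''
--         for j in range(i, 0, -1):
--             line += str(j) + ' '
--         result += line.strip() + '\n'
--     return result.strip()
-- ===== SOURCE B (Python) =====
-- def LAB_FUNCTIONS_101_string(n: int) -> str:
--     lines = []
--     cur = ''
--     for k in range(1, n + 1):
--         cur = str(k) if not cur else str(k) + ' ' + cur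
--         lines.append(cur)
--     return '\n'.join(reversed(lines))
-- ===== Notes on version B (the rewrite author's own statement) =====
-- stated objective: alternative
-- what changed: Builds each line from the previous one by prepending the next number in a single pass over k=1..n and joins the collected lines in reverse, instead of recomputing every line with a nested loop and stripping per-line and final separators.
import Mathlib
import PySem

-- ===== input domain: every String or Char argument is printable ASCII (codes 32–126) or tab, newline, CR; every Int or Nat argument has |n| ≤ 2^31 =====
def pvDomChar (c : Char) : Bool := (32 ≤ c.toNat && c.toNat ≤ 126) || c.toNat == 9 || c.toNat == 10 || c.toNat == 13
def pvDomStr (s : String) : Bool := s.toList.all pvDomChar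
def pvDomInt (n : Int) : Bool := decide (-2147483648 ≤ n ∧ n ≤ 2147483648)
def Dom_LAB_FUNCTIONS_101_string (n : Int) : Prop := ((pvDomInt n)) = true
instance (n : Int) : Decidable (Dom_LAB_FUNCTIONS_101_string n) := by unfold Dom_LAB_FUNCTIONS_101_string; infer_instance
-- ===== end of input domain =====

-- B builds each line from the previous one (single pass, numbers formatted once) and joins the
-- collected lines in reverse, instead of A's nested loop that reformats every line and strips separators.


-- ===== PORT A =====
def LAB_FUNCTIONS_101_string (n : Int) : String :=
  let result := (PySem.List.pyRange n 0 (-1)).foldl (fun result i =>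
    let line := (PySem.List.pyRange i 0 (-1)).foldl (fun line j =>
      line ++ (PySem.Int.toChars j ++ [' '])) ([] : List Char)
    result ++ (PySem.Chars.strip line ++ ['\n'])) ([] : List Char)
  String.ofList (PySem.Chars.strip result)

-- ===== PORT B =====
def LAB_FUNCTIONS_101_string_alt (n : Int) : String :=
  let st := (PySem.List.pyRange 1 (n + 1) 1).foldl
    (fun (st : List Char × List (List Char)) k =>
      let cur := if st.1.isEmpty then PySem.Int.toChars k
                 else PySem.Int.toChars k ++ ([' '] ++ st.1)
      (cur, st.2 ++ [cur])) ([], [])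
  String.ofList (PySem.Chars.join ['\n'] st.2.reverse)

-- ===== PRECONDITION & SPEC =====
def Spec_LAB_FUNCTIONS_101_string (n : Int) (out : String) : Prop := out = LAB_FUNCTIONS_101_string_alt n
instance (n : Int) (out : String) : Decidable (Spec_LAB_FUNCTIONS_101_string n out) := by unfold Spec_LAB_FUNCTIONS_101_string; infer_instance

-- ===== CLAIM (what is proved, stated in full; the proofs are below) =====
def Claim_equal_LAB_FUNCTIONS_101_string : Prop := ∀ (n : Int), Dom_LAB_FUNCTIONS_101_string n → Spec_LAB_FUNCTIONS_101_string n (LAB_FUNCTIONS_101_string n)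

-- ===== LEMMAS AND PROOFS =====

-- the line "m m-1 … 1" (single spaces, no trailing separator); the common value of both programs' lines
def lineL : Nat → List Char
  | 0 => []
  | 1 => PySem.Int.toChars 1
  | (m+2) => PySem.Int.toChars ((m : Int) + 2) ++ ' ' :: lineL (m+1)

-- the triangle "lineL m \n lineL (m-1) \n … \n lineL 1"
def triL : Nat → List Char
  | 0 => []
  | 1 => lineL 1
  | (m+2) => lineL (m+2) ++ '\n' :: triL (m+1)

-- B's collected lines, bottom line last
def linesList : Nat → List (List Char)
  | 0 => []
  | (m+1) => linesList m ++ [lineL (m+1)]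

theorem nospace_digitChar (k : Nat) : PySem.Chars.isspace (Nat.digitChar k) = false := by
  by_cases hk : k < 16
  · interval_cases k <;> decide
  · have h : Nat.digitChar k = '*' := by
      unfold Nat.digitChar
      repeat rw [if_neg (by omega)]
    rw [h]; decide

theorem toDigitsCore_nospace (f : Nat) : ∀ (n : Nat) (acc : List Char),
    (∀ c ∈ acc, PySem.Chars.isspace c = false) →
    ∀ c ∈ Nat.toDigitsCore 10 f n acc, PySem.Chars.isspace c = false := by
  induction f with
  | zero => intro n acc hacc c hc; exact hacc c hc
  | succ f ih =>
    intro n acc hacc c hc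
    rw [Nat.toDigitsCore] at hc
    by_cases h : n / 10 = 0
    · simp only [h, if_true] at hc
      rcases List.mem_cons.mp hc with h1 | h1
      · subst h1; exact nospace_digitChar _
      · exact hacc c h1
    · simp only [h, if_false] at hc
      refine ih (n / 10) _ ?_ c hc
      intro d hd
      rcases List.mem_cons.mp hd with h1 | h1
      · subst h1; exact nospace_digitChar _
      · exact hacc d h1

theorem toDigitsCore_ne_nil (f : Nat) : ∀ (n : Nat) (acc : List Char),
    0 < f → acc.length < (Nat.toDigitsCore 10 f n acc).length := by
  induction f with
  | zero => intro n acc h; omega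
  | succ f ih =>
    intro n acc _
    rw [Nat.toDigitsCore]
    by_cases h : n / 10 = 0
    · simp [h]
    · simp only [h, if_false]
      by_cases hf : 0 < f
      · have := ih (n / 10) ((n % 10).digitChar :: acc) hf
        simp at this ⊢; omega
      · interval_cases f
        simp [Nat.toDigitsCore]

theorem toChars_pos_cons (m : Nat) :
    ∃ d t, PySem.Int.toChars ((m : Int) + 1) = d :: t ∧ PySem.Chars.isspace d = false := by
  have h1 : PySem.Int.toChars ((m : Int) + 1) = Nat.toDigits 10 (m + 1) := by
    rw [PySem.Int.toChars, if_neg (by omega)]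
    congr 1
  rw [h1, Nat.toDigits]
  have hlen := toDigitsCore_ne_nil (m + 2) (m + 1) [] (by omega)
  have hns := toDigitsCore_nospace (m + 2) (m + 1) [] (by simp)
  rcases hcons : Nat.toDigitsCore 10 (m + 2) (m + 1) [] with _ | ⟨d, t⟩
  · rw [hcons] at hlen; simp at hlen
  · exact ⟨d, t, rfl, hns d (by rw [hcons]; simp)⟩

theorem lineL_cons (m : Nat) :
    ∃ d t, lineL (m + 1) = d :: t ∧ PySem.Chars.isspace d = false := by
  cases m with
  | zero => exact ⟨'1', [], by decide, by decide⟩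
  | succ m =>
    obtain ⟨d, t, hdt, hd⟩ := toChars_pos_cons (m + 1)
    refine ⟨d, t ++ ' ' :: lineL (m + 1), ?_, hd⟩
    show PySem.Int.toChars ((m : Int) + 2) ++ ' ' :: lineL (m + 1) = _
    have : (m : Int) + 2 = ((m + 1 : Nat) : Int) + 1 := by push_cast; ring
    rw [this, hdt]; simp

theorem lineL_getLast (m : Nat) : (lineL (m + 1)).getLast? = some '1' := by
  induction m with
  | zero => decide
  | succ m ih =>
    show (PySem.Int.toChars ((m : Int) + 2) ++ ' ' :: lineL (m + 1)).getLast? = some '1'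
    obtain ⟨d, t, hdt, _⟩ := lineL_cons m
    rw [List.getLast?_append_of_ne_nil _ (by simp),
      show ' ' :: lineL (m + 1) = [' '] ++ lineL (m + 1) from rfl,
      List.getLast?_append_of_ne_nil _ (by rw [hdt]; simp)]
    exact ih

theorem triL_cons (m : Nat) :
    ∃ d t, triL (m + 1) = d :: t ∧ PySem.Chars.isspace d = false := by
  cases m with
  | zero => exact ⟨'1', [], by decide, by decide⟩
  | succ m =>
    obtain ⟨d, t, hdt, hd⟩ := lineL_cons (m + 1)
    exact ⟨d, t ++ '\n' :: triL (m + 1), by show lineL (m + 2) ++ _ = _; rw [hdt]; simp, hd⟩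

theorem triL_getLast (m : Nat) : (triL (m + 1)).getLast? = some '1' := by
  induction m with
  | zero => decide
  | succ m ih =>
    show (lineL (m + 2) ++ '\n' :: triL (m + 1)).getLast? = some '1'
    obtain ⟨d, t, hdt, _⟩ := triL_cons m
    rw [List.getLast?_append_of_ne_nil _ (by simp),
      show '\n' :: triL (m + 1) = ['\n'] ++ triL (m + 1) from rfl,
      List.getLast?_append_of_ne_nil _ (by rw [hdt]; simp)]
    exact ih

-- stripping one trailing whitespace char off a list with non-space ends gives the list back
theorem strip_append_ws (l : List Char) (w : Char) (hw : PySem.Chars.isspace w = true)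
    (hcons : ∃ d t, l = d :: t ∧ PySem.Chars.isspace d = false)
    (hlast : l.getLast? = some '1') :
    PySem.Chars.strip (l ++ [w]) = l := by
  obtain ⟨d, t, hdt, hd⟩ := hcons
  have hlstrip : PySem.Chars.lstrip (l ++ [w]) = l ++ [w] := by
    rw [hdt]
    simp [PySem.Chars.lstrip, hd]
  rw [PySem.Chars.strip, hlstrip, PySem.Chars.rstrip, List.reverse_append]
  have h1 : PySem.Chars.isspace '1' = false := by decide
  have hrev : l.reverse.head? = some '1' := by rw [List.head?_reverse, hlast]
  rcases hr : l.reverse with _ | ⟨b, rest⟩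
  · rw [hr] at hrev; simp at hrev
  · rw [hr] at hrev
    simp only [List.head?_cons, Option.some.injEq] at hrev
    subst hrev
    simp only [List.reverse_cons, List.reverse_nil, List.nil_append, List.cons_append,
      List.dropWhile_cons, hw, if_true, h1, Bool.false_eq_true, if_false]
    rw [show l = ('1' :: rest).reverse from by rw [← hr, List.reverse_reverse], List.reverse_cons]

-- A's inner loop flatMap
theorem inner_flat (m : Nat) :
    (PySem.List.pyRange ((m : Int) + 1) 0 (-1)).flatMap
      (fun j => PySem.Int.toChars j ++ [' ']) = lineL (m + 1) ++ [' '] := by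
  induction m with
  | zero =>
    rw [PySem.List.pyRange_neg_one_cons (by omega), PySem.List.pyRange_neg_one_eq_nil (by omega)]
    simp [lineL]
  | succ m ih =>
    have hc : ((m + 1 : Nat) : Int) + 1 = (m : Int) + 1 + 1 := by push_cast; ring
    rw [hc, PySem.List.pyRange_neg_one_cons (by omega)]
    have h2 : (m : Int) + 1 + 1 - 1 = (m : Int) + 1 := by ring
    rw [List.flatMap_cons, h2, ih]
    show _ = (PySem.Int.toChars ((m : Int) + 2) ++ ' ' :: lineL (m + 1)) ++ [' ']
    have h3 : (m : Int) + 1 + 1 = (m : Int) + 2 := by ring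
    rw [h3]; simp

-- A's inner loop followed by strip gives lineL
theorem inner_strip (m : Nat) :
    PySem.Chars.strip ((PySem.List.pyRange ((m : Int) + 1) 0 (-1)).foldl
      (fun line j => line ++ (PySem.Int.toChars j ++ [' '])) ([] : List Char)) = lineL (m + 1) := by
  rw [PySem.List.foldl_append_eq_flatMap, List.nil_append, inner_flat]
  exact strip_append_ws _ _ (by decide) (lineL_cons m) (lineL_getLast m)

-- A's outer loop flatMap
theorem outer_flat (m : Nat) :
    (PySem.List.pyRange ((m : Int) + 1) 0 (-1)).flatMap
      (fun i => PySem.Chars.strip ((PySem.List.pyRange i 0 (-1)).foldl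
        (fun line j => line ++ (PySem.Int.toChars j ++ [' '])) ([] : List Char)) ++ ['\n'])
      = triL (m + 1) ++ ['\n'] := by
  induction m with
  | zero =>
    rw [PySem.List.pyRange_neg_one_cons (by omega), PySem.List.pyRange_neg_one_eq_nil (by omega)]
    rw [List.flatMap_cons, List.flatMap_nil, List.append_nil]
    have := inner_strip 0
    norm_num at this ⊢
    rw [this]; rfl
  | succ m ih =>
    have hc : ((m + 1 : Nat) : Int) + 1 = (m : Int) + 1 + 1 := by push_cast; ring
    rw [hc, PySem.List.pyRange_neg_one_cons (by omega)]
    have h2 : (m : Int) + 1 + 1 - 1 = (m : Int) + 1 := by ring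
    rw [List.flatMap_cons, h2, ih]
    have h3 : (m : Int) + 1 + 1 = ((m + 1 : Nat) : Int) + 1 := by push_cast; ring
    rw [h3, inner_strip (m + 1)]
    show _ = (lineL (m + 2) ++ '\n' :: triL (m + 1)) ++ ['\n']
    simp

-- A computes the triangle
theorem A_eq (n : Int) : LAB_FUNCTIONS_101_string n = String.ofList (triL n.toNat) := by
  unfold LAB_FUNCTIONS_101_string
  by_cases hn : n ≤ 0
  · rw [PySem.List.pyRange_neg_one_eq_nil hn]
    have : n.toNat = 0 := by omega
    rw [this]
    rfl
  · have hm : n = ((n.toNat - 1 : Nat) : Int) + 1 := by omega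
    simp only
    rw [PySem.List.foldl_append_eq_flatMap, List.nil_append, hm, outer_flat]
    have hmn : n.toNat = (n.toNat - 1) + 1 := by omega
    rw [hmn]
    congr 1
    exact strip_append_ws _ _ (by decide) (triL_cons _) (triL_getLast _)

-- B's fold invariant: after k = 1..m the state is (lineL m, linesList m)
theorem B_fold (m : Nat) :
    (PySem.List.pyRange 1 ((m : Int) + 1) 1).foldl
      (fun (st : List Char × List (List Char)) k =>
        let cur := if st.1.isEmpty then PySem.Int.toChars k
                   else PySem.Int.toChars k ++ ([' '] ++ st.1)
        (cur, st.2 ++ [cur])) ([], []) = (lineL m, linesList m) := by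
  induction m with
  | zero => rw [PySem.List.pyRange_one_eq_nil (by omega)]; rfl
  | succ m ih =>
    have h1 : ((m + 1 : Nat) : Int) + 1 = ((m : Int) + 1) + 1 := by push_cast; ring
    rw [h1, PySem.List.pyRange_one_succ_right (by omega), List.foldl_append, ih]
    simp only [List.foldl_cons, List.foldl_nil]
    cases m with
    | zero => rfl
    | succ m =>
      obtain ⟨d, t, hdt, _⟩ := lineL_cons m
      have hne : (lineL (m + 1)).isEmpty = false := by rw [hdt]; rfl
      show ((if (lineL (m + 1)).isEmpty = true then _ else _), _) = _
      rw [hne]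
      simp only [Bool.false_eq_true, if_false]
      have hcur : PySem.Int.toChars (((m + 1 : Nat) : Int) + 1) ++ ([' '] ++ lineL (m + 1)) = lineL (m + 2) := by
        show _ = PySem.Int.toChars ((m : Int) + 2) ++ ' ' :: lineL (m + 1)
        have hc2 : ((m + 1 : Nat) : Int) + 1 = (m : Int) + 2 := by push_cast; ring
        rw [hc2]; rfl
      rw [hcur]
      rfl

-- joining B's reversed lines gives the triangle
theorem join_lines (m : Nat) :
    PySem.Chars.join ['\n'] (linesList m).reverse = triL m := by
  induction m with
  | zero => rfl
  | succ m ih =>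
    show PySem.Chars.join ['\n'] ((linesList m ++ [lineL (m + 1)]).reverse) = triL (m + 1)
    rw [List.reverse_append]
    cases m with
    | zero => rfl
    | succ m =>
      have hrev : (linesList (m + 1)).reverse = lineL (m + 1) :: (linesList m).reverse := by
        show (linesList m ++ [lineL (m + 1)]).reverse = _
        rw [List.reverse_append]; rfl
      rw [hrev] at ih ⊢
      simp only [List.reverse_cons, List.reverse_nil, List.nil_append, List.singleton_append]
      rw [PySem.Chars.join_cons_cons, ih]
      show _ = lineL (m + 2) ++ '\n' :: triL (m + 1)
      simp

-- B computes the triangle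
theorem B_eq (n : Int) : LAB_FUNCTIONS_101_string_alt n = String.ofList (triL n.toNat) := by
  unfold LAB_FUNCTIONS_101_string_alt
  by_cases hn : n ≤ 0
  · rw [PySem.List.pyRange_one_eq_nil (by omega)]
    have : n.toNat = 0 := by omega
    rw [this]
    rfl
  · have hm : n + 1 = ((n.toNat : Int)) + 1 := by omega
    simp only
    rw [hm, B_fold, join_lines]

-- ===== VERDICT (by name: the statement is the Claim_ definition above) =====
theorem LAB_FUNCTIONS_101_string_spec : Claim_equal_LAB_FUNCTIONS_101_string := by
  intro n _
  unfold Spec_LAB_FUNCTIONS_101_string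
  rw [A_eq, B_eq]
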